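-- pv_equiv track=rewrite | github.com/heitmeih/adventofcode | python/2019/day4/day4.py | has_adjacent
-- ===== SOURCE A (Python) =====
-- def has_adjacent(password):
--     password = str(password)
--     for i in range(1, len(password) - 2):
--         if i == 1 and password[i - 1] == password[i] and password[i] != password[i + 1]: # checks beginning of password
--             return True
--         elif password[i - 1] != password[i] and password[i] == password[i + 1] and password[i + 1] != password[i + 2]: # checks middle of password
--             return True
--         elif i == len(password) - 3 and password[i] != password[i + 1] and password[i + 1] == password[i + 2]: # checks end of password
--             return True
--     return False
-- ===== SOURCE B (Python) =====
-- def has_adjacent(password):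
--     s = str(password)
--     run = 1
--     for prev, cur in zip(s, s[1:]):
--         if cur == prev:
--             run += 1
--         else:
--             if run == 2:
--                 return True
--             run = 1
--     return run == 2
-- ===== Notes on version B (the rewrite author's own statement) =====
-- stated objective: simpler
-- what changed: A's positional scan with three special-case branches (begin/middle/end of string) is replaced by a single run-length pass: one counter of the current run of equal adjacent characters, reporting a run that closes at exactly length 2.
-- intended difference: For passwords whose str() is shorter than four characters but contains a run of exactly two equal adjacent characters (e.g. 22, -33, 100), A's scan range is empty so A returns False, while B returns True, the intended answer to 'has a run of exactly two adjacent equal digits'. — e.g. on has_adjacent(22): A returns false, B returns true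
import Mathlib
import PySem

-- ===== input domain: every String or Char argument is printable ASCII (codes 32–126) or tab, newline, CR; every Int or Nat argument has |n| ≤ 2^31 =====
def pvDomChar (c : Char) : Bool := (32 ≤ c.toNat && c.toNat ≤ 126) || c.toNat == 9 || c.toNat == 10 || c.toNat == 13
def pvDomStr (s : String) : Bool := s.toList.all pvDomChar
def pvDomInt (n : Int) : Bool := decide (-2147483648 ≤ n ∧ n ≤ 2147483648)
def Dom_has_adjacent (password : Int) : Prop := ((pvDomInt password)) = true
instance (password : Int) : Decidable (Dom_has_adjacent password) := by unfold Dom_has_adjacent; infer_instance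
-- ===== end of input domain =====

-- B replaces A's three-branch positional scan by a single run-length counter pass (objective: simpler).

-- ===== PORT A =====
-- the for-loop over range(1, len(password) - 2) with its early returns (three elif branches)
def pvALoop (s : List Char) (n : Int) : List Int → Bool
  | [] => false
  | i :: rest =>
    if i = 1 ∧ PySem.List.pyGet? s (i - 1) = PySem.List.pyGet? s i ∧
        PySem.List.pyGet? s i ≠ PySem.List.pyGet? s (i + 1) then true
    else if PySem.List.pyGet? s (i - 1) ≠ PySem.List.pyGet? s i ∧
        PySem.List.pyGet? s i = PySem.List.pyGet? s (i + 1) ∧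
        PySem.List.pyGet? s (i + 1) ≠ PySem.List.pyGet? s (i + 2) then true
    else if i = n - 3 ∧ PySem.List.pyGet? s i ≠ PySem.List.pyGet? s (i + 1) ∧
        PySem.List.pyGet? s (i + 1) = PySem.List.pyGet? s (i + 2) then true
    else pvALoop s n rest

def has_adjacent (password : Int) : Bool :=
  pvALoop (PySem.Int.toChars password) ((PySem.Int.toChars password).length : Int)
    (PySem.List.pyRange 1 (((PySem.Int.toChars password).length : Int) - 2) 1)

-- ===== PORT B =====
-- the for-loop over zip(s, s[1:]) carrying the current run length
def pvBLoop (run : Int) : List (Char × Char) → Bool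
  | [] => decide (run = 2)
  | (prev, cur) :: rest =>
    if cur = prev then pvBLoop (run + 1) rest
    else if run = 2 then true
    else pvBLoop 1 rest

def has_adjacent_alt (password : Int) : Bool :=
  pvBLoop 1 ((PySem.Int.toChars password).zip
    (PySem.List.slice (PySem.Int.toChars password) (some 1) none))

-- ===== PRECONDITION & SPEC =====
-- For passwords whose str() is shorter than four characters but contains a run of exactly two equal
-- adjacent characters (e.g. 22, -33, 100), A's scan range is empty so A returns False, while B
-- returns True, the intended answer to "has a run of exactly two adjacent equal characters".
def D_has_adjacent (password : Int) : Prop :=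
  ((PySem.Int.toChars password).length = 2 ∧
      (PySem.Int.toChars password)[0]? = (PySem.Int.toChars password)[1]?) ∨
    ((PySem.Int.toChars password).length = 3 ∧
      (((PySem.Int.toChars password)[0]? = (PySem.Int.toChars password)[1]? ∧
          (PySem.Int.toChars password)[1]? ≠ (PySem.Int.toChars password)[2]?) ∨
       ((PySem.Int.toChars password)[0]? ≠ (PySem.Int.toChars password)[1]? ∧
          (PySem.Int.toChars password)[1]? = (PySem.Int.toChars password)[2]?)))
instance (password : Int) : Decidable (D_has_adjacent password) := by
  unfold D_has_adjacent; infer_instance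

def Spec_has_adjacent (password : Int) (out : Bool) : Prop :=
  ¬ D_has_adjacent password → out = has_adjacent_alt password
instance (password : Int) (out : Bool) : Decidable (Spec_has_adjacent password out) := by
  unfold Spec_has_adjacent; infer_instance

def pvDiffWitness_has_adjacent : Int := 22
def pvDiffWitnessOut_has_adjacent : Bool × Bool := (false, true)

-- ===== CLAIM (what is proved, stated in full; the proofs are below) =====
def Claim_unchanged_has_adjacent : Prop := ∀ (password : Int), Dom_has_adjacent password → Spec_has_adjacent password (has_adjacent password)
def Claim_changed_has_adjacent : Prop := Dom_has_adjacent (pvDiffWitness_has_adjacent) ∧ D_has_adjacent (pvDiffWitness_has_adjacent) ∧ has_adjacent (pvDiffWitness_has_adjacent) = pvDiffWitnessOut_has_adjacent.1 ∧ has_adjacent_alt (pvDiffWitness_has_adjacent) = pvDiffWitnessOut_has_adjacent.2 ∧ pvDiffWitnessOut_has_adjacent.1 ≠ pvDiffWitnessOut_has_adjacent.2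
def Claim_exact_has_adjacent : Prop := ∀ (password : Int), Dom_has_adjacent password → D_has_adjacent password → has_adjacent password ≠ has_adjacent_alt password

-- ===== LEMMAS AND PROOFS =====

-- "s has a run of exactly two equal adjacent characters at gap j"
def pvPos (s : List Char) (j : ℕ) : Prop :=
  s[j]? = s[j+1]? ∧ (s[j+1]?).isSome ∧ (j = 0 ∨ s[j-1]? ≠ s[j]?) ∧ s[j+1]? ≠ s[j+2]?

-- run-length recursion used as the common reference point of both proofs
def pvExact2 : List Char → Bool
  | [] => false
  | c :: l =>
    if (l.takeWhile (· == c)).length = 1 then true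
    else pvExact2 (l.dropWhile (· == c))
termination_by s => s.length
decreasing_by
  simp only [List.length_cons]
  exact Nat.lt_succ_of_le (List.length_dropWhile_le _ _)

theorem pvBLoop_eq (l : List Char) : ∀ (c : Char) (n : ℕ), 1 ≤ n →
    pvBLoop (n : Int) ((c :: l).zip l) =
      (decide (n + (l.takeWhile (· == c)).length = 2) || pvExact2 (l.dropWhile (· == c))) := by
  induction l with
  | nil => intro c n _; simp [pvBLoop, pvExact2]; omega
  | cons b rest ih =>
    intro c n hn
    show pvBLoop (n : Int) ((c, b) :: (b :: rest).zip rest) = _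
    by_cases hbc : b = c
    · subst hbc
      have h1 : pvBLoop (n : Int) ((b, b) :: (b :: rest).zip rest)
          = pvBLoop ((n + 1 : ℕ) : Int) ((b :: rest).zip rest) := by
        simp [pvBLoop]
      rw [h1, ih b (n + 1) (by omega)]
      have htw : (b :: rest).takeWhile (· == b) = b :: rest.takeWhile (· == b) := by
        simp
      have hdw : (b :: rest).dropWhile (· == b) = rest.dropWhile (· == b) := by
        simp
      rw [htw, hdw, List.length_cons]
      rw [decide_eq_decide.mpr (show n + 1 + (rest.takeWhile (· == b)).length = 2
        ↔ n + ((rest.takeWhile (· == b)).length + 1) = 2 from by omega)]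
    · have h1 : pvBLoop (n : Int) ((c, b) :: (b :: rest).zip rest)
          = if (n : Int) = 2 then true else pvBLoop ((1 : ℕ) : Int) ((b :: rest).zip rest) := by
        simp [pvBLoop, hbc]
      rw [h1, ih b 1 le_rfl]
      have htw : (b :: rest).takeWhile (· == c) = [] := by
        simp [hbc]
      have hdw : (b :: rest).dropWhile (· == c) = b :: rest := by
        simp [hbc]
      rw [htw, hdw]
      have he : pvExact2 (b :: rest)
          = if (rest.takeWhile (· == b)).length = 1 then true
            else pvExact2 (rest.dropWhile (· == b)) := by rw [pvExact2]
      rw [he]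
      by_cases h2 : n = 2 <;> by_cases h3 : (rest.takeWhile (· == b)).length = 1
      · simp [h2, h3]
      · simp [h2, h3]
      · have : ¬ ((n : ℤ) = 2) := by omega
        simp [this, h2, h3]
      · have : ¬ ((n : ℤ) = 2) := by omega
        simp [this, h2, h3]
        intro hx
        exact absurd (by omega : (rest.takeWhile (· == b)).length = 1) h3

theorem pvAlt_eq (p : Int) : has_adjacent_alt p = pvExact2 (PySem.Int.toChars p) := by
  unfold has_adjacent_alt
  cases h : PySem.Int.toChars p with
  | nil => simp [PySem.List.slice, pvBLoop, pvExact2]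
  | cons c l =>
    have hs : PySem.List.slice (c :: l) (some 1) none = l := by
      rw [PySem.List.slice_from (c :: l) (show (0:ℤ) ≤ 1 by norm_num)]
      rfl
    rw [hs]
    have h1 : pvBLoop 1 ((c :: l).zip l) = pvBLoop ((1 : ℕ) : Int) ((c :: l).zip l) := by norm_num
    rw [h1, pvBLoop_eq l c 1 le_rfl]
    have he : pvExact2 (c :: l)
        = if (l.takeWhile (· == c)).length = 1 then true
          else pvExact2 (l.dropWhile (· == c)) := by rw [pvExact2]
    rw [he]
    by_cases h2 : (l.takeWhile (· == c)).length = 1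
    · simp [h2]
    · have : ¬ (1 + (l.takeWhile (· == c)).length = 2) := by omega
      simp [h2, this]

theorem pvPos_split (m : ℕ) (hm : 1 ≤ m) (c : Char) (d : List Char)
    (hd : ∀ b, d[0]? = some b → b ≠ c) :
    (∃ j, pvPos (List.replicate m c ++ d) j) ↔ (m = 2 ∨ ∃ j, pvPos d j) := by
  have hget : ∀ i : ℕ, (List.replicate m c ++ d)[i]? = if i < m then some c else d[i - m]? := by
    intro i
    by_cases h : i < m
    · rw [List.getElem?_append_left (by simpa using h)]
      simp [h]
    · rw [List.getElem?_append_right (by simpa using Nat.le_of_not_lt h)]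
      simp [h]
  constructor
  · rintro ⟨j, h1, h2, h3, h4⟩
    rw [hget, hget] at h1
    rw [hget] at h2
    rw [hget, hget] at h4
    by_cases hj1 : j + 1 < m
    · -- pair entirely inside the replicate block
      left
      have hj : j < m := by omega
      rw [if_pos hj, if_pos hj1] at h1
      rw [if_pos hj1] at h4
      by_cases hj2 : j + 2 < m
      · rw [if_pos hj2] at h4; exact absurd rfl h4
      · rcases h3 with h0 | hne
        · omega
        · exfalso
          rw [hget, hget, if_pos (by omega), if_pos hj] at hne
          exact hne rfl
    · by_cases hj2 : j + 1 = m
      · -- pair straddling the block boundary: impossible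
        exfalso
        rw [if_pos (by omega), if_neg (by omega)] at h1
        rw [if_neg (by omega)] at h2
        rcases Option.isSome_iff_exists.mp h2 with ⟨b, hb⟩
        rw [hb] at h1
        have hbc : b = c := by injection h1.symm
        exact hd b (by rwa [show j + 1 - m = 0 by omega] at hb) hbc
      · -- pair entirely inside d
        right
        refine ⟨j - m, ?_, ?_, ?_, ?_⟩
        · rw [if_neg (by omega), if_neg (by omega),
            show j - m = j - m from rfl, show j + 1 - m = j - m + 1 by omega] at h1
          exact h1
        · rw [if_neg (by omega), show j + 1 - m = j - m + 1 by omega] at h2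
          exact h2
        · by_cases hj0 : j = m
          · left; omega
          · right
            rcases h3 with h0 | hne
            · omega
            · rw [hget, hget, if_neg (by omega), if_neg (by omega),
                show j - 1 - m = j - m - 1 by omega] at hne
              exact hne
        · rw [if_neg (by omega), if_neg (by omega),
            show j + 1 - m = j - m + 1 by omega, show j + 2 - m = j - m + 2 by omega] at h4
          exact h4
  · intro h
    rcases h with hm2 | ⟨j, h1, h2, h3, h4⟩
    · -- m = 2: the replicate block itself is the exact pair
      refine ⟨0, ?_, ?_, Or.inl rfl, ?_⟩
      · rw [hget, hget, if_pos (by omega), if_pos (by omega)]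
      · rw [hget, if_pos (by omega)]; rfl
      · rw [hget, hget, if_pos (by omega), if_neg (by omega), show 0 + 2 - m = 0 by omega]
        intro hcon
        cases hc : d[0]? with
        | none => rw [hc] at hcon; simp at hcon
        | some b => exact hd b hc (by rw [hc] at hcon; injection hcon.symm)
    · -- shift a witness of d up by m
      have h2' : j + 1 < d.length := by
        have := h2; simpa [isSome_getElem?] using this
      refine ⟨j + m, ?_, ?_, ?_, ?_⟩
      · rw [hget, hget, if_neg (by omega), if_neg (by omega),
          show j + m - m = j by omega, show j + m + 1 - m = j + 1 by omega]
        exact h1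
      · rw [hget, if_neg (by omega), show j + m + 1 - m = j + 1 by omega]
        exact h2
      · right
        by_cases hj0 : j = 0
        · subst hj0
          rw [hget, hget, if_pos (by omega), if_neg (by omega), show 0 + m - m = 0 by omega]
          have hd0 : d[0]?.isSome := by rw [h1]; exact h2
          rcases Option.isSome_iff_exists.mp hd0 with ⟨b, hb⟩
          rw [hb]
          intro hcon
          have hcb : c = b := by injection hcon
          exact hd b hb hcb.symm
        · rw [hget, hget, if_neg (by omega), if_neg (by omega),
            show j + m - 1 - m = j - 1 by omega, show j + m - m = j by omega]
          rcases h3 with h0 | hne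
          · omega
          · exact hne
      · rw [hget, hget, if_neg (by omega), if_neg (by omega),
          show j + m + 1 - m = j + 1 by omega, show j + m + 2 - m = j + 2 by omega]
        exact h4

theorem pvHead_dropWhile (p : Char → Bool) (l : List Char) (b : Char)
    (h : (l.dropWhile p)[0]? = some b) : p b = false := by
  induction l with
  | nil => simp at h
  | cons a t ih =>
    rw [List.dropWhile_cons] at h
    split at h
    · exact ih h
    · next hp => simp at h; subst h; simpa using hp

theorem pvExact2_iff_aux : ∀ (N : ℕ) (s : List Char), s.length ≤ N →
    (pvExact2 s = true ↔ ∃ j, pvPos s j) := by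
  intro N
  induction N with
  | zero =>
    intro s hs
    have : s = [] := List.length_eq_zero_iff.mp (by omega)
    subst this
    simp [pvExact2, pvPos]
  | succ N ih =>
    intro s hs
    cases s with
    | nil => simp [pvExact2, pvPos]
    | cons c l =>
      have htw : l.takeWhile (· == c) = List.replicate (l.takeWhile (· == c)).length c := by
        apply List.eq_replicate_of_mem
        intro b hb
        simpa using List.mem_takeWhile_imp hb
      have hrep : c :: l = List.replicate ((l.takeWhile (· == c)).length + 1) c
          ++ l.dropWhile (· == c) := by
        rw [List.replicate_succ, List.cons_append]
        congr 1
        conv_lhs => rw [← List.takeWhile_append_dropWhile (p := (· == c)) (l := l)]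
        rw [← htw]
      have hd : ∀ b, (l.dropWhile (· == c))[0]? = some b → b ≠ c := by
        intro b hb
        have := pvHead_dropWhile (· == c) l b hb
        simpa using this
      have hsplit := pvPos_split ((l.takeWhile (· == c)).length + 1) (by omega) c
        (l.dropWhile (· == c)) hd
      rw [← hrep] at hsplit
      have hdl : (l.dropWhile (· == c)).length ≤ N := by
        have := List.length_dropWhile_le (· == c) l
        simp at hs
        omega
      have he : pvExact2 (c :: l)
          = if (l.takeWhile (· == c)).length = 1 then true
            else pvExact2 (l.dropWhile (· == c)) := by rw [pvExact2]
      rw [he, hsplit]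
      by_cases hk : (l.takeWhile (· == c)).length = 1
      · simp [hk]
      · have : ¬ ((l.takeWhile (· == c)).length + 1 = 2) := by omega
        simp [hk, this, ih _ hdl]

theorem pvExact2_iff (s : List Char) : pvExact2 s = true ↔ ∃ j, pvPos s j :=
  pvExact2_iff_aux s.length s le_rfl

-- A's loop is an existential over its range
theorem pvALoop_iff (s : List Char) (n : Int) (r : List Int) :
    pvALoop s n r = true ↔ ∃ i ∈ r,
      ((i = 1 ∧ PySem.List.pyGet? s (i - 1) = PySem.List.pyGet? s i ∧
          PySem.List.pyGet? s i ≠ PySem.List.pyGet? s (i + 1)) ∨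
       (PySem.List.pyGet? s (i - 1) ≠ PySem.List.pyGet? s i ∧
          PySem.List.pyGet? s i = PySem.List.pyGet? s (i + 1) ∧
          PySem.List.pyGet? s (i + 1) ≠ PySem.List.pyGet? s (i + 2)) ∨
       (i = n - 3 ∧ PySem.List.pyGet? s i ≠ PySem.List.pyGet? s (i + 1) ∧
          PySem.List.pyGet? s (i + 1) = PySem.List.pyGet? s (i + 2))) := by
  induction r with
  | nil => simp [pvALoop]
  | cons i rest ih =>
    rw [pvALoop]
    split_ifs with h1 h2 h3
    · simp only [true_iff]; exact ⟨i, List.mem_cons_self .., Or.inl h1⟩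
    · simp only [true_iff]; exact ⟨i, List.mem_cons_self .., Or.inr (Or.inl h2)⟩
    · simp only [true_iff]; exact ⟨i, List.mem_cons_self .., Or.inr (Or.inr h3)⟩
    · rw [ih]
      constructor
      · rintro ⟨x, hx, hc⟩; exact ⟨x, List.mem_cons_of_mem _ hx, hc⟩
      · rintro ⟨x, hx, hc⟩
        rcases List.mem_cons.mp hx with rfl | hx'
        · tauto
        · exact ⟨x, hx', hc⟩

-- the positional characterisation of A's scan, for strings of length ≥ 4
theorem pvA_pos (s : List Char) (h4 : 4 ≤ s.length) :
    (∃ i ∈ PySem.List.pyRange 1 ((s.length : Int) - 2) 1,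
      ((i = 1 ∧ PySem.List.pyGet? s (i - 1) = PySem.List.pyGet? s i ∧
          PySem.List.pyGet? s i ≠ PySem.List.pyGet? s (i + 1)) ∨
       (PySem.List.pyGet? s (i - 1) ≠ PySem.List.pyGet? s i ∧
          PySem.List.pyGet? s i = PySem.List.pyGet? s (i + 1) ∧
          PySem.List.pyGet? s (i + 1) ≠ PySem.List.pyGet? s (i + 2)) ∨
       (i = (s.length : Int) - 3 ∧ PySem.List.pyGet? s i ≠ PySem.List.pyGet? s (i + 1) ∧
          PySem.List.pyGet? s (i + 1) = PySem.List.pyGet? s (i + 2)))) ↔ ∃ j, pvPos s j := by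
  have hg : ∀ (t : ℤ) (k : ℕ), t = (k : ℤ) → PySem.List.pyGet? s t = s[k]? := by
    rintro t k rfl; exact PySem.List.pyGet?_natCast s k
  have hsome : ∀ k : ℕ, k < s.length → (s[k]?).isSome := by
    intro k hk; simp [hk]
  constructor
  · rintro ⟨i, hmem, hc⟩
    rw [PySem.List.mem_pyRange_one] at hmem
    obtain ⟨hi1, hi2⟩ := hmem
    have hj : ((i.toNat : ℤ)) = i := Int.toNat_of_nonneg (by omega)
    set j : ℕ := i.toNat with hjdef
    have hjb : 1 ≤ j ∧ (j : ℤ) < (s.length : ℤ) - 2 := by omega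
    rcases hc with ⟨hie, heq, hne⟩ | ⟨hne1, heq, hne2⟩ | ⟨hie, hne, heq⟩
    · -- beginning branch: exact pair at gap 0
      subst hie
      refine ⟨0, ?_, ?_, Or.inl rfl, ?_⟩
      · rw [hg (1 - 1) 0 (by norm_num), hg 1 1 (by norm_num)] at heq; exact heq
      · exact hsome 1 (by omega)
      · rw [hg 1 1 (by norm_num), hg (1 + 1) 2 (by norm_num)] at hne; exact hne
    · -- middle branch: exact pair at gap j
      refine ⟨j, ?_, ?_, Or.inr ?_, ?_⟩
      · rw [hg i j (by omega), hg (i + 1) (j + 1) (by omega)] at heq; exact heq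
      · exact hsome (j + 1) (by omega)
      · rw [hg (i - 1) (j - 1) (by omega), hg i j (by omega)] at hne1; exact hne1
      · rw [hg (i + 1) (j + 1) (by omega), hg (i + 2) (j + 2) (by omega)] at hne2; exact hne2
    · -- end branch: exact pair at gap length-2
      refine ⟨s.length - 2, ?_, ?_, Or.inr ?_, ?_⟩
      · rw [hg (i + 1) (s.length - 2) (by omega), hg (i + 2) (s.length - 2 + 1) (by omega)] at heq
        exact heq
      · exact hsome (s.length - 2 + 1) (by omega)
      · rw [hg i (s.length - 2 - 1) (by omega), hg (i + 1) (s.length - 2) (by omega)] at hne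
        exact hne
      · have hnone : s[s.length - 2 + 2]? = none := by
          rw [List.getElem?_eq_none_iff]; omega
        rw [hnone]
        have := hsome (s.length - 2 + 1) (by omega)
        intro hcon
        rw [hcon] at this
        simp at this
  · rintro ⟨j, h1, h2, h3, h4'⟩
    have hjlt : j + 1 < s.length := by simpa [isSome_getElem?] using h2
    by_cases hj0 : j = 0
    · -- gap 0: the beginning branch at i = 1
      subst hj0
      refine ⟨1, ?_, Or.inl ⟨rfl, ?_, ?_⟩⟩
      · rw [PySem.List.mem_pyRange_one]; omega
      · rw [hg (1 - 1) 0 (by norm_num), hg 1 1 (by norm_num)]; exact h1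
      · rw [hg 1 1 (by norm_num), hg (1 + 1) 2 (by norm_num)]; exact h4'
    · by_cases hjm : j + 3 ≤ s.length
      · -- middle branch at i = j
        refine ⟨(j : ℤ), ?_, Or.inr (Or.inl ⟨?_, ?_, ?_⟩)⟩
        · rw [PySem.List.mem_pyRange_one]; omega
        · rw [hg ((j : ℤ) - 1) (j - 1) (by omega), hg (j : ℤ) j (by omega)]
          rcases h3 with h0 | hne
          · omega
          · exact hne
        · rw [hg (j : ℤ) j (by omega), hg ((j : ℤ) + 1) (j + 1) (by omega)]; exact h1
        · rw [hg ((j : ℤ) + 1) (j + 1) (by omega), hg ((j : ℤ) + 2) (j + 2) (by omega)]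
          exact h4'
      · -- gap length-2: the end branch at i = length-3
        have hj2 : j = s.length - 2 := by omega
        subst hj2
        refine ⟨(s.length : ℤ) - 3, ?_, Or.inr (Or.inr ⟨rfl, ?_, ?_⟩)⟩
        · rw [PySem.List.mem_pyRange_one]; omega
        · rw [hg ((s.length : ℤ) - 3) (s.length - 2 - 1) (by omega),
            hg ((s.length : ℤ) - 3 + 1) (s.length - 2) (by omega)]
          rcases h3 with h0 | hne
          · omega
          · exact hne
        · rw [hg ((s.length : ℤ) - 3 + 1) (s.length - 2) (by omega),
            hg ((s.length : ℤ) - 3 + 2) (s.length - 2 + 1) (by omega)]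
          exact h1

-- for short strings, a positional exact pair is exactly the D_ condition
theorem pvPos_short (s : List Char) (h : s.length ≤ 3) :
    (∃ j, pvPos s j) ↔
      ((s.length = 2 ∧ s[0]? = s[1]?) ∨
        (s.length = 3 ∧ ((s[0]? = s[1]? ∧ s[1]? ≠ s[2]?) ∨ (s[0]? ≠ s[1]? ∧ s[1]? = s[2]?)))) := by
  constructor
  · rintro ⟨j, h1, h2, h3, h4⟩
    have hjlt : j + 1 < s.length := by simpa [isSome_getElem?] using h2
    have hl2 : s.length = 2 ∨ s.length = 3 := by omega
    rcases hl2 with hl | hl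
    · left
      have hj0 : j = 0 := by omega
      subst hj0
      exact ⟨hl, h1⟩
    · right
      refine ⟨hl, ?_⟩
      have hj01 : j = 0 ∨ j = 1 := by omega
      rcases hj01 with hj | hj <;> subst hj
      · exact Or.inl ⟨h1, h4⟩
      · rcases h3 with h0 | hne
        · omega
        · exact Or.inr ⟨by simpa using hne, h1⟩
  · rintro (⟨hl, heq⟩ | ⟨hl, ⟨heq, hne⟩ | ⟨hne, heq⟩⟩)
    · refine ⟨0, heq, by simp [hl], Or.inl rfl, ?_⟩
      have : s[2]? = none := by rw [List.getElem?_eq_none_iff]; omega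
      rw [this, ← heq]
      simp [List.getElem?_eq_getElem (show 0 < s.length by omega)]
    · exact ⟨0, heq, by simp [hl], Or.inl rfl, hne⟩
    · refine ⟨1, heq, by simp [hl], Or.inr (by simpa using hne), ?_⟩
      have : s[3]? = none := by rw [List.getElem?_eq_none_iff]; omega
      rw [this, ← heq]
      simp [List.getElem?_eq_getElem (show 1 < s.length by omega)]

-- ===== VERDICT (by name: the statement is the Claim_ definition above) =====
theorem has_adjacent_spec : Claim_unchanged_has_adjacent := by
  intro p _ hD
  show has_adjacent p = has_adjacent_alt p
  rw [pvAlt_eq]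
  unfold has_adjacent
  rw [Bool.eq_iff_iff, pvALoop_iff, pvExact2_iff]
  by_cases h4 : 4 ≤ (PySem.Int.toChars p).length
  · exact pvA_pos (PySem.Int.toChars p) h4
  · constructor
    · rintro ⟨i, hmem, _⟩
      rw [PySem.List.mem_pyRange_one] at hmem
      exfalso; omega
    · intro hpos
      exact absurd ((pvPos_short (PySem.Int.toChars p) (by omega)).mp hpos) hD

theorem has_adjacent_changed : Claim_changed_has_adjacent := by
  unfold Claim_changed_has_adjacent; decide

theorem has_adjacent_tight : Claim_exact_has_adjacent := by
  intro p _ hD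
  have hlen : (PySem.Int.toChars p).length ≤ 3 := by
    rcases hD with ⟨h, _⟩ | ⟨h, _⟩ <;> omega
  have hB : has_adjacent_alt p = true := by
    rw [pvAlt_eq, pvExact2_iff]
    exact (pvPos_short (PySem.Int.toChars p) hlen).mpr hD
  have hA : has_adjacent p = false := by
    rw [Bool.eq_false_iff]
    intro hc
    unfold has_adjacent at hc
    rw [pvALoop_iff] at hc
    rcases hc with ⟨i, hmem, _⟩
    rw [PySem.List.mem_pyRange_one] at hmem
    omega
  rw [hA, hB]
  simp
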